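-- pv_equiv track=rewrite | github.com/Nic30/hwtHlsGdb | hwtHlsGdb/gdbMiMessages.py | filterArgs
-- ===== SOURCE A (Python) =====
-- from typing import Optional, List, Tuple, IO, Any, Deque
--
-- def filterArgs(args: List[str], ignoredArgs: List[List[str]]) -> List[str]:
--     res = []
--     argLen = len(args)
--     longestPattern = 0
--     for argI, a in enumerate(args):
--         if longestPattern != 0:
--             longestPattern -= 1
--             continue
--
--         for ignorePattern in ignoredArgs:
--             prnLen = len(ignorePattern)
--             if a == ignorePattern[0] and prnLen + argI <= argLen:
--                 longestPattern = max(longestPattern, prnLen)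
--
--         if longestPattern == 0:
--             res.append(a)
--         else:
--             longestPattern -= 1
--
--     return res
-- ===== SOURCE B (Python) =====
-- def filterArgs(args, ignoredArgs):
--     # Staged: (1) group pattern lengths by first element and sort each group,
--     # (2) binary-search the largest fitting length per position, (3) emit by jumps.
--     table = {}
--     for p in ignoredArgs:
--         table.setdefault(p[0], []).append(len(p))
--     for ls in table.values():
--         ls.sort()
--     n = len(args)
--     jumps = []
--     for i, a in enumerate(args):
--         ls = table.get(a, [])
--         cap = n - i
--         lo, hi = 0, len(ls)
--         while lo < hi:
--             mid = (lo + hi) // 2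
--             if ls[mid] <= cap:
--                 lo = mid + 1
--             else:
--                 hi = mid
--         jumps.append(ls[lo - 1] if lo else 0)
--     res = []
--     i = 0
--     while i < n:
--         m = jumps[i]
--         if m:
--             i += m
--         else:
--             res.append(args[i])
--             i += 1
--     return res
-- ===== Notes on version B (the rewrite author's own statement) =====
-- stated objective: faster
-- what changed: B is staged: it groups pattern lengths by first element and sorts each group once, then computes the max fitting pattern length per position by binary search into a jumps array, and finally emits the result by walking the jumps array - instead of A's single pass that rescans all patterns at every position with a decrementing skip counter.
-- outside the precondition, e.g. on filterArgs([], [[]]): A returns [], B raises IndexError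
import Mathlib
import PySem

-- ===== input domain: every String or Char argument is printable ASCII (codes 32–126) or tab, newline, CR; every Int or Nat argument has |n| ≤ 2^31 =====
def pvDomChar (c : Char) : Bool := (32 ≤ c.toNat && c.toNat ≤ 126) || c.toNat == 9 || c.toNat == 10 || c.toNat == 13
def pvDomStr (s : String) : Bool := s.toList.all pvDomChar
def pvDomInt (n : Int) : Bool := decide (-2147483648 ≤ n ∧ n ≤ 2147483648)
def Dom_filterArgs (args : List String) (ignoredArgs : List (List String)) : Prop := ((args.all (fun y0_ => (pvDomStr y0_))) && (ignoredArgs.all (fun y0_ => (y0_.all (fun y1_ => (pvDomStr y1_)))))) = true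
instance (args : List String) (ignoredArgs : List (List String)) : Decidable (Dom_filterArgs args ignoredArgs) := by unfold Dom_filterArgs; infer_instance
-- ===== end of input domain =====

-- B replaces A's single pass (which rescans every ignore pattern at each position with a
-- decrementing skip counter) by three stages: group pattern lengths by first element and
-- sort each group, binary-search the largest fitting length per position into a jumps
-- array, then emit the result by walking the jumps array.

-- ===== PORT A =====
-- A's inner loop over ignoredArgs (ignorePattern[0] is pyGet? …; none = IndexError, excluded by Pre_)
def pvInnerA (ignoredArgs : List (List String)) (argLen : Int) (argI : Int) (a : String) : Int :=
  ignoredArgs.foldl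
    (fun lp ip =>
      if PySem.List.pyGet? ip 0 = some a ∧ (ip.length : Int) + argI ≤ argLen
      then max lp (ip.length : Int) else lp) 0

-- A's outer loop body (state = (res, longestPattern))
def pvStepA (ignoredArgs : List (List String)) (argLen : Int) :
    (List String × Int) → (Int × String) → (List String × Int) :=
  fun st p =>
    if st.2 ≠ 0 then (st.1, st.2 - 1)
    else
      let lp := pvInnerA ignoredArgs argLen p.1 p.2
      if lp = 0 then (st.1 ++ [p.2], 0) else (st.1, lp - 1)

def filterArgs (args : List String) (ignoredArgs : List (List String)) : List String :=
  ((PySem.List.enumerate args 0).foldl (pvStepA ignoredArgs (args.length : Int)) ([], 0)).1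

-- ===== PORT B =====
-- stage 1a: table.setdefault(p[0], []).append(len(p))
def pvTable (ignoredArgs : List (List String)) : PySem.Dict String (List Nat) :=
  ignoredArgs.foldl
    (fun d p =>
      match p.head? with              -- p[0]: IndexError on an empty pattern, excluded by Pre_
      | some k => d.modify k [] (fun v => v ++ [p.length])
      | none => d)
    PySem.Dict.empty

-- stage 1b: for ls in table.values(): ls.sort()
def pvSortedTable (ignoredArgs : List (List String)) : PySem.Dict String (List Nat) :=
  PySem.Dict.mk ((pvTable ignoredArgs).items.map
    (fun q => (q.1, PySem.List.sorted q.2 (fun x => x) false)))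

-- the hand-written binary-search while-loop of Source B (lo, hi are nonnegative ints)
def pvBisect (ls : List Nat) (cap : Int) (lo hi : Nat) : Nat :=
  if lo < hi then
    let mid := (lo + hi) / 2
    if ((ls.getD mid 0 : Nat) : Int) ≤ cap then pvBisect ls cap (mid + 1) hi
    else pvBisect ls cap lo mid
  else lo
termination_by hi - lo
decreasing_by all_goals omega

-- jumps.append(ls[lo - 1] if lo else 0)   (lo ≤ len(ls), so ls[lo-1] is in range when lo ≠ 0)
def pvJump (ls : List Nat) (cap : Int) : Nat :=
  let lo := pvBisect ls cap 0 ls.length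
  if lo = 0 then 0 else ls.getD (lo - 1) 0

-- stage 2: for i, a in enumerate(args): … jumps.append(…)
def pvJumps (args : List String) (d : PySem.Dict String (List Nat)) : List Nat :=
  (PySem.List.enumerate args 0).foldl
    (fun acc p => acc ++ [pvJump (d.getD p.2 []) ((args.length : Int) - p.1)]) []

-- stage 3: the emitting while-loop (fuel = n, consumed once per iteration; i jumps by m)
def pvWalk (args : List String) (jumps : List Nat) (n : Nat) : Nat → Nat → List String
  | 0, _ => []
  | fuel+1, i =>
    if i < n then
      let m := jumps.getD i 0
      if m = 0 then args.getD i "" :: pvWalk args jumps n fuel (i + 1)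
      else pvWalk args jumps n fuel (i + m)
    else []

def filterArgs_alt (args : List String) (ignoredArgs : List (List String)) : List String :=
  pvWalk args (pvJumps args (pvSortedTable ignoredArgs)) args.length args.length 0

-- ===== PRECONDITION & SPEC =====
-- Pre_ excludes an empty pattern in ignoredArgs: there Python A raises IndexError on
-- ignorePattern[0] whenever args is nonempty (and B's table building raises always,
-- so the corner args = [] with an empty pattern, where A returns [], is excluded too).
def Pre_filterArgs (_args : List String) (ignoredArgs : List (List String)) : Prop :=
  ∀ p ∈ ignoredArgs, p ≠ []
instance (args : List String) (ignoredArgs : List (List String)) : Decidable (Pre_filterArgs args ignoredArgs) := by unfold Pre_filterArgs; infer_instance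

def pvWitness_filterArgs : List String × List (List String) :=
  (["x", "a", "b", "y", "a"], [["a", "b"], ["z"]])

def Spec_filterArgs (args : List String) (ignoredArgs : List (List String)) (out : List String) : Prop := out = filterArgs_alt args ignoredArgs
instance (args : List String) (ignoredArgs : List (List String)) (out : List String) : Decidable (Spec_filterArgs args ignoredArgs out) := by unfold Spec_filterArgs; infer_instance

-- ===== CLAIM (what is proved, stated in full; the proofs are below) =====
def Claim_equal_filterArgs : Prop := ∀ (args : List String) (ignoredArgs : List (List String)), Dom_filterArgs args ignoredArgs → Pre_filterArgs args ignoredArgs → Spec_filterArgs args ignoredArgs (filterArgs args ignoredArgs)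

-- ===== LEMMAS AND PROOFS =====

-- the lengths of the patterns whose first element is a, in input order
def pvLens (a : String) (ignoredArgs : List (List String)) : List Nat :=
  (ignoredArgs.filter (fun p => p.head? == some a)).map List.length

-- proof-side reading of A's per-position maximum
def pvMaxFit (cap : Nat) (ls : List Nat) : Nat :=
  ls.foldl (fun m L => if L ≤ cap ∧ m < L then L else m) 0

-- recursive reading of A's loop (position j, pending skip counter lp)
def pvASpec (ignoredArgs : List (List String)) (n : Nat) : Nat → List String → Int → List String
  | _, [], _ => []
  | j, a :: t, lp =>
    if lp ≠ 0 then pvASpec ignoredArgs n (j+1) t (lp - 1)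
    else
      let m := pvInnerA ignoredArgs (n : Int) (j : Int) a
      if m = 0 then a :: pvASpec ignoredArgs n (j+1) t 0
      else pvASpec ignoredArgs n (j+1) t (m - 1)

theorem pvFoldA (ignoredArgs : List (List String)) (n : Nat) :
    ∀ (l : List String) (j : Nat) (res : List String) (lp : Int),
      ((PySem.List.enumerate l (j : Int)).foldl (pvStepA ignoredArgs (n : Int)) (res, lp)).1
        = res ++ pvASpec ignoredArgs n j l lp := by
  intro l
  induction l with
  | nil => intro j res lp; simp [PySem.List.enumerate_nil, pvASpec]
  | cons a t ih =>
    intro j res lp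
    have hc : ((j : Int) + 1) = (((j + 1 : Nat)) : Int) := by push_cast; ring
    rw [PySem.List.enumerate_cons, List.foldl_cons]
    by_cases hlp : lp = 0
    · subst hlp
      by_cases hm : pvInnerA ignoredArgs (n : Int) (j : Int) a = 0
      · have hstep : pvStepA ignoredArgs (n : Int) (res, 0) ((j : Int), a) = (res ++ [a], 0) := by
          simp [pvStepA, hm]
        rw [hstep, hc, ih (j+1) (res ++ [a]) 0]
        simp [pvASpec, hm]
      · have hstep : pvStepA ignoredArgs (n : Int) (res, 0) ((j : Int), a)
            = (res, pvInnerA ignoredArgs (n : Int) (j : Int) a - 1) := by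
          simp [pvStepA, hm]
        rw [hstep, hc, ih (j+1) res _]
        simp [pvASpec, hm]
    · have hstep : pvStepA ignoredArgs (n : Int) (res, lp) ((j : Int), a) = (res, lp - 1) := by
        simp [pvStepA, hlp]
      rw [hstep, hc, ih (j+1) res (lp - 1)]
      simp [pvASpec, hlp]

theorem pvSkip (ignoredArgs : List (List String)) (n : Nat) :
    ∀ (k : Nat) (l : List String) (j : Nat), k ≤ l.length →
      pvASpec ignoredArgs n j l (k : Int) = pvASpec ignoredArgs n (j + k) (l.drop k) 0 := by
  intro k
  induction k with
  | zero => intro l j _; simp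
  | succ k ih =>
    intro l j hk
    cases l with
    | nil => simp at hk
    | cons a t =>
      have h1 : ¬((k + 1 : Nat) : Int) = 0 := by push_cast; omega
      have h2 : ((k + 1 : Nat) : Int) - 1 = ((k : Nat) : Int) := by push_cast; ring
      rw [show pvASpec ignoredArgs n j (a :: t) ((k + 1 : Nat) : Int)
            = pvASpec ignoredArgs n (j+1) t (((k + 1 : Nat) : Int) - 1) from by
          rw [pvASpec, if_pos h1]]
      rw [h2, ih t (j+1) (by simpa using hk)]
      simp only [List.drop_succ_cons]
      congr 1
      omega

theorem pvMaxFit_le (cap : Nat) (ls : List Nat) : pvMaxFit cap ls ≤ cap := by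
  suffices h : ∀ (ls : List Nat) (acc : Nat), acc ≤ cap →
      ls.foldl (fun m L => if L ≤ cap ∧ m < L then L else m) acc ≤ cap by
    exact h ls 0 (Nat.zero_le _)
  intro ls
  induction ls with
  | nil => intro acc h; simpa using h
  | cons L t ih =>
    intro acc h
    simp only [List.foldl_cons]
    split_ifs with hL
    · exact ih L hL.1
    · exact ih acc h

-- A's inner fold equals pvMaxFit of the matching lengths
theorem pvFoldEq (n j : Nat) (hj : j ≤ n) (a : String) :
    ∀ (ign : List (List String)), (∀ p ∈ ign, p ≠ []) → ∀ (acc : Nat),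
      ign.foldl
        (fun lp ip =>
          if PySem.List.pyGet? ip 0 = some a ∧ (ip.length : Int) + (j : Int) ≤ (n : Int)
          then max lp (ip.length : Int) else lp) ((acc : Nat) : Int)
      = ((((ign.filter (fun p => p.head? == some a)).map List.length).foldl
            (fun m L => if L ≤ n - j ∧ m < L then L else m) acc : Nat) : Int) := by
  intro ign
  induction ign with
  | nil => intro _ acc; simp
  | cons p t ih =>
    intro hPre acc
    cases p with
    | nil => exact absurd rfl (hPre [] (List.mem_cons_self ..))
    | cons x xs =>
      have hget : PySem.List.pyGet? (x :: xs) 0 = some x := by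
        simp [PySem.List.pyGet?, PySem.List.pyIdx?]
      have hPre' : ∀ q ∈ t, q ≠ [] := fun q hq => hPre q (List.mem_cons_of_mem _ hq)
      simp only [List.foldl_cons, List.filter_cons, List.head?_cons]
      by_cases hx : x = a
      · subst hx
        have htrue : ((some x : Option String) == some x) = true := by simp
        simp only [htrue, if_true, List.map_cons, List.foldl_cons]
        have hlen : (((x :: xs).length : Int) + (j : Int) ≤ (n : Int))
            ↔ (x :: xs).length ≤ n - j := by omega
        by_cases hfit : (x :: xs).length ≤ n - j
        · rw [if_pos ⟨hget, hlen.mpr hfit⟩]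
          have hmax : max ((acc : Nat) : Int) (((x :: xs).length : Nat) : Int)
              = ((max acc (x :: xs).length : Nat) : Int) := by push_cast; omega
          have hbinit : (if (x :: xs).length ≤ n - j ∧ acc < (x :: xs).length
                then (x :: xs).length else acc) = max acc (x :: xs).length := by
            split_ifs <;> omega
          rw [hmax, hbinit]
          exact ih hPre' (max acc (x :: xs).length)
        · rw [if_neg (by rintro ⟨-, h2⟩; exact hfit (hlen.mp h2))]
          have hbinit : (if (x :: xs).length ≤ n - j ∧ acc < (x :: xs).length
                then (x :: xs).length else acc) = acc := by
            rw [if_neg (by rintro ⟨h1, -⟩; exact hfit h1)]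
          rw [hbinit]
          exact ih hPre' acc
      · have hcond : ¬(PySem.List.pyGet? (x :: xs) 0 = some a
              ∧ ((x :: xs).length : Int) + (j : Int) ≤ (n : Int)) := by
          rintro ⟨h1, -⟩
          rw [hget] at h1
          exact hx (Option.some_injective _ h1)
        have hbeq : ((some x : Option String) == some a) = false := by simp [hx]
        rw [if_neg hcond]
        simp only [hbeq, Bool.false_eq_true, if_false]
        exact ih hPre' acc

theorem pvInner_eq (ignoredArgs : List (List String)) (n j : Nat) (a : String)
    (hPre : ∀ p ∈ ignoredArgs, p ≠ []) (hj : j ≤ n) :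
    pvInnerA ignoredArgs (n : Int) (j : Int) a
      = ((pvMaxFit (n - j) (pvLens a ignoredArgs) : Nat) : Int) := by
  unfold pvInnerA pvMaxFit pvLens
  have := pvFoldEq n j hj a ignoredArgs hPre 0
  simpa using this

-- ===== B-side bridging =====

-- filtering the (head, length) pairs by first component is filtering patterns by head
theorem pvPairs_filter (a : String) :
    ∀ (ign : List (List String)), (∀ p ∈ ign, p ≠ []) →
      ((ign.map (fun p => (p.headD "", p.length))).filter (fun q => q.1 == a)).map (fun q => q.2)
        = pvLens a ign := by
  intro ign
  induction ign with
  | nil => intro _; simp [pvLens]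
  | cons p t ih =>
    intro hPre
    have ih' := ih (fun q hq => hPre q (List.mem_cons_of_mem _ hq))
    cases p with
    | nil => exact absurd rfl (hPre [] (List.mem_cons_self ..))
    | cons x xs =>
      simp only [pvLens, List.map_cons, List.filter_cons, List.headD_cons, List.head?_cons]
      by_cases hx : x = a
      · subst hx
        simp only [BEq.rfl, if_true, List.map_cons]
        simp only [pvLens] at ih'
        rw [ih']
      · have h1 : ((x : String) == a) = false := by simp [hx]
        have h2 : ((some x : Option String) == some a) = false := by simp [hx]
        simp only [h1, h2, Bool.false_eq_true, if_false]
        simpa [pvLens] using ih'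

-- stage 1a builds exactly the (unsorted) length groups
theorem pvTable_getD (a : String) (ignoredArgs : List (List String))
    (hPre : ∀ p ∈ ignoredArgs, p ≠ []) :
    (pvTable ignoredArgs).getD a [] = pvLens a ignoredArgs := by
  unfold pvTable
  have hcongr : ignoredArgs.foldl
      (fun d p =>
        match p.head? with
        | some k => d.modify k [] (fun v => v ++ [p.length])
        | none => d) PySem.Dict.empty
      = (ignoredArgs.map (fun p => (p.headD "", p.length))).foldl
          (fun d q => d.modify q.1 [] (fun v => v ++ [q.2])) PySem.Dict.empty := by
    rw [List.foldl_map]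
    apply PySem.List.foldl_congr_mem
    intro d p hp
    cases p with
    | nil => exact absurd rfl (hPre [] hp)
    | cons x xs => simp
  rw [hcongr, PySem.Dict.getD_foldl_modify_append]
  simp only [PySem.Dict.getD_empty, List.nil_append]
  exact pvPairs_filter a ignoredArgs hPre

-- stage 1b sorts each group (generic: mapping a value transform over a literal dict)
theorem pvGetD_mk_map (f : List Nat → List Nat) (hf : f [] = [])
    (l : List (String × List Nat)) (a : String) :
    (PySem.Dict.mk (l.map (fun q => (q.1, f q.2)))).getD a []
      = f ((PySem.Dict.mk l).getD a []) := by
  induction l with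
  | nil => simp [PySem.Dict.getD, PySem.Dict.get?, hf]
  | cons q t ih =>
    obtain ⟨k, v⟩ := q
    simp only [List.map_cons, PySem.Dict.getD_eq_get?_getD, PySem.Dict.get?_mk_cons]
    by_cases hx : (k == a) = true
    · simp [hx]
    · simp only [hx, Bool.false_eq_true, if_false]
      simpa [PySem.Dict.getD_eq_get?_getD] using ih

theorem pvSortedTable_getD (a : String) (ignoredArgs : List (List String))
    (hPre : ∀ p ∈ ignoredArgs, p ≠ []) :
    (pvSortedTable ignoredArgs).getD a []
      = PySem.List.sorted (pvLens a ignoredArgs) (fun x => x) false := by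
  unfold pvSortedTable
  rw [pvGetD_mk_map (fun v => PySem.List.sorted v (fun x => x) false) rfl]
  rw [show PySem.Dict.mk (pvTable ignoredArgs).items = pvTable ignoredArgs from rfl]
  rw [pvTable_getD a ignoredArgs hPre]

-- ===== binary-search correctness =====

-- the boundary: number of leading elements ≤ cap
def pvK (ls : List Nat) (c : Nat) : Nat := (ls.takeWhile (fun L => decide (L ≤ c))).length

theorem pvK_le (ls : List Nat) (c : Nat) : pvK ls c ≤ ls.length := by
  unfold pvK
  exact (List.takeWhile_prefix _).length_le

theorem pvK_lt (ls : List Nat) (c : Nat) (j : Nat) (hj : j < pvK ls c) :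
    ls.getD j 0 ≤ c := by
  have hjl : j < ls.length := lt_of_lt_of_le hj (pvK_le ls c)
  have hpre := List.takeWhile_prefix (l := ls) (fun L => decide (L ≤ c))
  have hjk : j < (ls.takeWhile (fun L => decide (L ≤ c))).length := hj
  have hget : (ls.takeWhile (fun L => decide (L ≤ c)))[j] = ls[j] :=
    hpre.getElem hjk
  have hmem : (ls.takeWhile (fun L => decide (L ≤ c)))[j]
      ∈ ls.takeWhile (fun L => decide (L ≤ c)) := List.getElem_mem hjk
  have := List.mem_takeWhile_imp hmem
  rw [hget] at this
  rw [List.getD_eq_getElem ls 0 hjl]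
  simpa using this

theorem pvK_ge (ls : List Nat) (c : Nat) (hs : ls.Pairwise (· ≤ ·)) (j : Nat)
    (hk : pvK ls c ≤ j) (hj : j < ls.length) : c < ls.getD j 0 := by
  set k := pvK ls c with hkdef
  have hkk0 : k = (ls.takeWhile (fun L => decide (L ≤ c))).length := rfl
  have hklen : k < ls.length := lt_of_le_of_lt hk hj
  have hsplit : ls.takeWhile (fun L => decide (L ≤ c)) ++ ls.dropWhile (fun L => decide (L ≤ c)) = ls :=
    List.takeWhile_append_dropWhile
  have hlens : (ls.takeWhile (fun L => decide (L ≤ c))).length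
      + (ls.dropWhile (fun L => decide (L ≤ c))).length = ls.length := by
    have := congrArg List.length hsplit
    rw [List.length_append] at this
    exact this
  have hdne : ls.dropWhile (fun L => decide (L ≤ c)) ≠ [] := by
    intro h
    rw [h] at hlens
    simp at hlens
    omega
  have hdpos : 0 < (ls.dropWhile (fun L => decide (L ≤ c))).length :=
    List.length_pos_iff.mpr hdne
  have hhead := List.head_dropWhile_not (fun L => decide (L ≤ c)) hdne
  have h2 : ls[k]? = (ls.dropWhile (fun L => decide (L ≤ c)))[0]? := by
    conv_lhs => rw [← hsplit]
    rw [List.getElem?_append_right (by omega)]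
    congr 1
    omega
  rw [List.getElem?_eq_getElem hklen, List.getElem?_eq_getElem hdpos] at h2
  have h3 : (ls.dropWhile (fun L => decide (L ≤ c))).head hdne
      = (ls.dropWhile (fun L => decide (L ≤ c)))[0]'hdpos := by
    simp [List.head_eq_getElem]
  rw [h3] at hhead
  rw [← Option.some_injective _ h2] at hhead
  have hck : c < ls[k] := by simpa using hhead
  have hmono : ls[k] ≤ ls[j]'hj := by
    rcases Nat.eq_or_lt_of_le hk with he | hlt
    · subst he; rfl
    · exact (List.pairwise_iff_getElem.mp hs) k j hklen hj hlt
  rw [List.getD_eq_getElem ls 0 hj]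
  omega

theorem pvBisect_eq (ls : List Nat) (c : Nat) (hs : ls.Pairwise (· ≤ ·)) :
    ∀ (fuel lo hi : Nat), hi - lo ≤ fuel → lo ≤ pvK ls c → pvK ls c ≤ hi → hi ≤ ls.length →
      pvBisect ls (c : Int) lo hi = pvK ls c := by
  intro fuel
  induction fuel with
  | zero =>
    intro lo hi hf h1 h2 h3
    rw [pvBisect]
    rw [if_neg (by omega)]
    omega
  | succ fuel ih =>
    intro lo hi hf h1 h2 h3
    rw [pvBisect]
    by_cases hlh : lo < hi
    · rw [if_pos hlh]
      have hmid1 : lo ≤ (lo + hi) / 2 := by omega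
      have hmid2 : (lo + hi) / 2 < hi := by omega
      by_cases hc : ((ls.getD ((lo + hi) / 2) 0 : Nat) : Int) ≤ (c : Int)
      · simp only [hc, if_pos]
        have hklt : (lo + hi) / 2 < pvK ls c := by
          by_contra hge
          have := pvK_ge ls c hs ((lo + hi) / 2) (by omega) (by omega)
          omega
        exact ih ((lo + hi) / 2 + 1) hi (by omega) (by omega) h2 h3
      · simp only [hc, if_false]
        have hkle : pvK ls c ≤ (lo + hi) / 2 := by
          by_contra hlt
          have := pvK_lt ls c ((lo + hi) / 2) (by omega)
          omega
        exact ih lo ((lo + hi) / 2) (by omega) h1 hkle (by omega)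
    · rw [if_neg hlh]
      omega

-- ===== pvMaxFit characterisations =====

theorem pvMaxFit_eq_foldl_max (cap : Nat) (ls : List Nat) :
    pvMaxFit cap ls = (ls.filter (fun L => decide (L ≤ cap))).foldl max 0 := by
  unfold pvMaxFit
  have hstep : ∀ (l : List Nat) (acc : Nat),
      l.foldl (fun m L => if L ≤ cap ∧ m < L then L else m) acc
        = l.foldl (fun m L => if L ≤ cap then max m L else m) acc := by
    intro l
    induction l with
    | nil => intro acc; simp
    | cons L t ih =>
      intro acc
      simp only [List.foldl_cons]
      have : (if L ≤ cap ∧ acc < L then L else acc) = (if L ≤ cap then max acc L else acc) := by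
        split_ifs <;> omega
      rw [this]
      exact ih _
  rw [hstep]
  exact PySem.List.foldl_ite_eq_foldl_filter (fun L => L ≤ cap) max ls 0

theorem pvFoldlMax_perm (l1 l2 : List Nat) (h : l1.Perm l2) :
    l1.foldl max 0 = l2.foldl max 0 := by
  apply le_antisymm
  · rcases PySem.List.foldl_max_mem l1 0 with h0 | hm
    · rw [h0]; exact (PySem.List.le_foldl_max l2 0).1
    · exact (PySem.List.le_foldl_max l2 0).2 _ (h.mem_iff.mp hm)
  · rcases PySem.List.foldl_max_mem l2 0 with h0 | hm
    · rw [h0]; exact (PySem.List.le_foldl_max l1 0).1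
    · exact (PySem.List.le_foldl_max l1 0).2 _ (h.mem_iff.mpr hm)

theorem pvMaxFit_sorted (cap : Nat) (ls : List Nat) :
    pvMaxFit cap (PySem.List.sorted ls (fun x => x) false) = pvMaxFit cap ls := by
  rw [pvMaxFit_eq_foldl_max, pvMaxFit_eq_foldl_max]
  exact pvFoldlMax_perm _ _ ((PySem.List.sorted_perm ls (fun x => x) false).filter _)

-- on a sorted list, filter (≤ cap) = takeWhile (≤ cap)
theorem pvFilter_eq_takeWhile (cap : Nat) :
    ∀ (ls : List Nat), ls.Pairwise (· ≤ ·) →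
      ls.filter (fun L => decide (L ≤ cap)) = ls.takeWhile (fun L => decide (L ≤ cap)) := by
  intro ls
  induction ls with
  | nil => intro _; simp
  | cons L t ih =>
    intro hs
    have hs' := (List.pairwise_cons.mp hs).2
    have hall := (List.pairwise_cons.mp hs).1
    by_cases hL : L ≤ cap
    · simp only [List.filter_cons, List.takeWhile_cons, decide_eq_true hL, if_pos]
      rw [ih hs']
    · have hfal : (decide (L ≤ cap)) = false := by simpa using hL
      simp only [List.filter_cons, List.takeWhile_cons, hfal, Bool.false_eq_true, if_false]
      apply List.filter_eq_nil_iff.mpr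
      intro x hx
      have := hall x hx
      simpa using (by omega : ¬ x ≤ cap)
    
-- on a sorted list the max of the fitting prefix is its last element
theorem pvMaxFit_sorted_eval (cap : Nat) (ls : List Nat) (hs : ls.Pairwise (· ≤ ·)) :
    pvMaxFit cap ls = if pvK ls cap = 0 then 0 else ls.getD (pvK ls cap - 1) 0 := by
  rw [pvMaxFit_eq_foldl_max, pvFilter_eq_takeWhile cap ls hs]
  set tw := ls.takeWhile (fun L => decide (L ≤ cap)) with htw
  have hklen : pvK ls cap = tw.length := rfl
  by_cases hk : pvK ls cap = 0
  · rw [hk]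
    have : tw = [] := List.length_eq_zero_iff.mp (by omega)
    rw [this]
    simp
  · rw [if_neg hk]
    have hlt : pvK ls cap - 1 < tw.length := by omega
    have hpre := List.takeWhile_prefix (l := ls) (fun L => decide (L ≤ cap))
    have hlt' : pvK ls cap - 1 < ls.length := lt_of_lt_of_le hlt hpre.length_le
    have hgeq : tw[pvK ls cap - 1] = ls[pvK ls cap - 1] := hpre.getElem hlt
    have htws : tw.Pairwise (· ≤ ·) := hs.sublist (List.takeWhile_sublist _)
    rw [List.getD_eq_getElem ls 0 hlt', ← hgeq]
    apply le_antisymm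
    · rcases PySem.List.foldl_max_mem tw 0 with h0 | hm
      · rw [h0]; exact Nat.zero_le _
      · obtain ⟨j, hj, hje⟩ := List.mem_iff_getElem.mp hm
        rw [← hje]
        rcases Nat.eq_or_lt_of_le (by omega : j ≤ pvK ls cap - 1) with he | hlt2
        · subst he; rfl
        · exact (List.pairwise_iff_getElem.mp htws) j (pvK ls cap - 1) hj hlt hlt2
    · exact (PySem.List.le_foldl_max tw 0).2 _ (List.getElem_mem hlt)

-- the jump value at capacity c is A's maximum fitting length
theorem pvJump_eq (ls : List Nat) (c : Nat) :
    pvJump (PySem.List.sorted ls (fun x => x) false) (c : Int) = pvMaxFit c ls := by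
  set sl := PySem.List.sorted ls (fun x => x) false with hsl
  have hs : sl.Pairwise (· ≤ ·) := by
    have := PySem.List.sorted_pairwise ls (fun x => x)
    simpa [hsl] using this
  unfold pvJump
  rw [pvBisect_eq sl c hs sl.length 0 sl.length (by omega) (by omega) (pvK_le sl c) le_rfl]
  rw [← pvMaxFit_sorted c ls, pvMaxFit_sorted_eval c sl hs]

-- the jumps array entry at i < n
theorem pvJumps_getD (args : List String) (ignoredArgs : List (List String))
    (hPre : ∀ p ∈ ignoredArgs, p ≠ []) (i : Nat) (hi : i < args.length) :
    (pvJumps args (pvSortedTable ignoredArgs)).getD i 0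
      = pvMaxFit (args.length - i) (pvLens (args[i]) ignoredArgs) := by
  unfold pvJumps
  rw [PySem.List.foldl_append_singleton_eq_map]
  simp only [List.nil_append]
  have hlen : i < (PySem.List.enumerate args 0).length := by
    rw [PySem.List.length_enumerate]; exact hi
  rw [List.getD_eq_getElem _ 0 (by simpa using hlen)]
  simp only [List.getElem_map, PySem.List.getElem_enumerate]
  have hcast : ((args.length : Int) - ((0 : Int) + (i : Nat))) = ((args.length - i : Nat) : Int) := by
    omega
  rw [pvSortedTable_getD (args[i]) ignoredArgs hPre, hcast, pvJump_eq]

-- ===== main loop correspondence =====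

theorem pvMain (args : List String) (ignoredArgs : List (List String))
    (hPre : ∀ p ∈ ignoredArgs, p ≠ []) :
    ∀ (fuel j : Nat) (l : List String), l = args.drop j → j + l.length = args.length →
      l.length ≤ fuel →
      pvASpec ignoredArgs args.length j l 0
        = pvWalk args (pvJumps args (pvSortedTable ignoredArgs)) args.length fuel j := by
  intro fuel
  induction fuel with
  | zero =>
    intro j l hdrop hlen hfuel
    have : l = [] := List.length_eq_zero_iff.mp (Nat.le_zero.mp hfuel)
    subst this
    simp only [List.length_nil, Nat.add_zero] at hlen
    simp [pvASpec, pvWalk]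
  | succ fuel ih =>
    intro j l hdrop hlen hfuel
    cases l with
    | nil =>
      simp only [List.length_nil, Nat.add_zero] at hlen
      simp [pvASpec, pvWalk, hlen]
    | cons a t =>
      have hj : j < args.length := by simp at hlen; omega
      have hgetE : args[j]'hj = a := by
        have h0 : (args.drop j)[0]? = some a := by rw [← hdrop]; simp
        rw [List.getElem?_drop] at h0
        simp only [Nat.add_zero] at h0
        rw [List.getElem?_eq_getElem hj] at h0
        exact Option.some_injective _ h0
      have hget : args.getD j "" = a := by
        rw [List.getD_eq_getElem args "" hj, hgetE]
      have ht : t = args.drop (j + 1) := by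
        have h := congrArg (List.drop 1) hdrop
        simpa [List.drop_drop, Nat.add_comm] using h
      set m := pvMaxFit (args.length - j) (pvLens a ignoredArgs) with hm
      have hInner : pvInnerA ignoredArgs (args.length : Int) (j : Int) a = ((m : Nat) : Int) :=
        pvInner_eq ignoredArgs args.length j a hPre (Nat.le_of_lt hj)
      have hJ : (pvJumps args (pvSortedTable ignoredArgs)).getD j 0 = m := by
        rw [pvJumps_getD args ignoredArgs hPre j hj, hgetE]
      have hmle : m ≤ args.length - j := pvMaxFit_le _ _
      have htlen : t.length = args.length - j - 1 := by simp at hlen; omega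
      rw [show pvWalk args (pvJumps args (pvSortedTable ignoredArgs)) args.length (fuel+1) j
            = (if j < args.length then
                (if (pvJumps args (pvSortedTable ignoredArgs)).getD j 0 = 0
                 then args.getD j "" :: pvWalk args (pvJumps args (pvSortedTable ignoredArgs)) args.length fuel (j+1)
                 else pvWalk args (pvJumps args (pvSortedTable ignoredArgs)) args.length fuel
                   (j + (pvJumps args (pvSortedTable ignoredArgs)).getD j 0))
              else []) from rfl]
      rw [if_pos hj, hget, hJ]
      by_cases hm0 : m = 0
      · have hA0 : pvInnerA ignoredArgs (args.length : Int) (j : Int) a = 0 := by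
          rw [hInner, hm0]; rfl
        rw [if_pos hm0]
        rw [show pvASpec ignoredArgs args.length j (a :: t) 0
              = a :: pvASpec ignoredArgs args.length (j+1) t 0 from by simp [pvASpec, hA0]]
        congr 1
        exact ih (j+1) t ht (by omega) (by simp at hfuel; omega)
      · have hm1 : 1 ≤ m := Nat.one_le_iff_ne_zero.mpr hm0
        have hA0 : pvInnerA ignoredArgs (args.length : Int) (j : Int) a ≠ 0 := by
          rw [hInner]; exact_mod_cast hm0
        rw [if_neg hm0]
        rw [show pvASpec ignoredArgs args.length j (a :: t) 0
              = pvASpec ignoredArgs args.length (j+1) t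
                  (pvInnerA ignoredArgs (args.length : Int) (j : Int) a - 1) from by
            simp [pvASpec, hA0]]
        have hc : pvInnerA ignoredArgs (args.length : Int) (j : Int) a - 1
            = ((m - 1 : Nat) : Int) := by
          rw [hInner]; omega
        rw [hc, pvSkip ignoredArgs args.length (m-1) t (j+1) (by omega)]
        have hjm : j + 1 + (m - 1) = j + m := by omega
        rw [hjm]
        refine ih (j + m) (t.drop (m-1)) ?_ ?_ ?_
        · rw [ht, List.drop_drop]
          congr 1
        · simp only [List.length_drop, htlen]
          omega
        · have hf : t.length + 1 ≤ fuel + 1 := by simpa using hfuel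
          have hd : (t.drop (m-1)).length = t.length - (m-1) := List.length_drop ..
          omega

-- ===== VERDICT (by name: the statement is the Claim_ definition above) =====
theorem filterArgs_spec : Claim_equal_filterArgs := by
  intro args ignoredArgs _ hPre
  unfold Spec_filterArgs filterArgs filterArgs_alt
  have hA := pvFoldA ignoredArgs args.length args 0 [] 0
  simp only [Nat.cast_zero, List.nil_append] at hA
  rw [hA]
  exact pvMain args ignoredArgs hPre args.length 0 args rfl (by simp) (by simp)
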